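-- pv_equiv track=rewrite | github.com/michael-lazar/playscii | formats/in_ans.py | get_commands_from_sequence
-- ===== SOURCE A (Python) =====
-- def get_commands_from_sequence(seq):
--     "returns command type & commands (separated by semicolon) from sequence"
--     cmds = []
--     new_cmd = ''
--     for k in seq[:-1]:
--         if k != 59:
--             new_cmd += chr(k)
--         else:
--             cmds.append(new_cmd)
--             new_cmd = ''
--     # include last command
--     cmds.append(new_cmd)
--     return chr(seq[-1]), cmds
-- ===== SOURCE B (Python) =====
-- def get_commands_from_sequence(seq):
--     "returns command type & commands (separated by semicolon) from sequence"
--     body = ''.join(chr(k) for k in seq[:-1])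
--     return chr(seq[-1]), body.split(';')
-- ===== Notes on version B (the rewrite author's own statement) =====
-- stated objective: idiomatic
-- what changed: Replaces A's interleaved accumulate-and-branch-on-59 loop with a two-phase decomposition: decode the whole prefix to a string in one pass, then split it on ';' with str.split.
import Mathlib
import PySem

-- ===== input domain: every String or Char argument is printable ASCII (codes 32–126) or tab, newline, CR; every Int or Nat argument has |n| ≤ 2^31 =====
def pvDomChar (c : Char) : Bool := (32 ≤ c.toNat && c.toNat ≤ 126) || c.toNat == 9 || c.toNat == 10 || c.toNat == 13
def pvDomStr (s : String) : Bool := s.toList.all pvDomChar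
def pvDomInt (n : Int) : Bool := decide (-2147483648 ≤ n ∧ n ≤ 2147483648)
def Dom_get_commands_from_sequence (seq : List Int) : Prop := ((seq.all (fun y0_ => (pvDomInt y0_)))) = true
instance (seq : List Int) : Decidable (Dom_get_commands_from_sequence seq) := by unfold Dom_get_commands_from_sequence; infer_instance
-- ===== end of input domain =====

-- B decodes the whole prefix to a string in one pass and then splits it on ';',
-- replacing A's interleaved accumulate-and-branch-on-59 loop (objective: idiomatic).


-- ===== PORT A =====
-- chr(k): exact for every valid code point; out-of-range / surrogate codes are excluded by Pre_
def pvChr (k : Int) : Char := Char.ofNat k.toNat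

def pvStepA (st : List String × String) (k : Int) : List String × String :=
  if k ≠ 59 then (st.1, st.2 ++ String.singleton (pvChr k))
  else (st.1 ++ [st.2], "")

def get_commands_from_sequence (seq : List Int) : String × List String :=
  let st := (PySem.List.slice seq none (some (-1))).foldl pvStepA ([], "")
  (String.singleton (pvChr ((PySem.List.pyGet? seq (-1)).getD 0)), st.1 ++ [st.2])

-- ===== PORT B =====
def get_commands_from_sequence_alt (seq : List Int) : String × List String :=
  let body := (PySem.List.slice seq none (some (-1))).map pvChr
  (String.singleton (pvChr ((PySem.List.pyGet? seq (-1)).getD 0)),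
   (body.splitOn ';').map String.ofList)

-- ===== PRECONDITION & SPEC =====
-- Pre_ excludes the empty sequence (seq[-1] raises IndexError), codes outside chr's range
-- 0..0x10FFFF (chr raises ValueError), and surrogate code points 0xD800–0xDFFF, on which A
-- returns lone-surrogate strings that are not representable as Lean Strings (B returns the same).
def Pre_get_commands_from_sequence (seq : List Int) : Prop :=
  seq ≠ [] ∧ seq.all (fun k => decide ((0 ≤ k ∧ k < 55296) ∨ (57344 ≤ k ∧ k < 1114112))) = true
instance (seq : List Int) : Decidable (Pre_get_commands_from_sequence seq) := by unfold Pre_get_commands_from_sequence; infer_instance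

def pvWitness_get_commands_from_sequence : List Int := [104, 105, 59, 33, 109]

def Spec_get_commands_from_sequence (seq : List Int) (out : String × List String) : Prop := out = get_commands_from_sequence_alt seq
instance (seq : List Int) (out : String × List String) : Decidable (Spec_get_commands_from_sequence seq out) := by unfold Spec_get_commands_from_sequence; infer_instance

-- ===== CLAIM (what is proved, stated in full; the proofs are below) =====
def Claim_equal_get_commands_from_sequence : Prop := ∀ (seq : List Int), Dom_get_commands_from_sequence seq → Pre_get_commands_from_sequence seq → Spec_get_commands_from_sequence seq (get_commands_from_sequence seq)

-- ===== LEMMAS AND PROOFS =====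

lemma pvChr_ne_semi {k : Int} (h : k ≠ 59) : pvChr k ≠ ';' := by
  intro he
  have ht := congrArg Char.toNat he
  have hs : (';' : Char).toNat = 59 := rfl
  rw [hs] at ht
  unfold pvChr at ht
  rw [Char.toNat_ofNat] at ht
  split_ifs at ht
  all_goals omega

lemma pvChr_semi : pvChr 59 = ';' := by decide

lemma foldA_split (ks : List Int) (acc : List String) (pre : List Char) (h : ';' ∉ pre) :
    (ks.foldl pvStepA (acc, String.ofList pre)).1 ++ [(ks.foldl pvStepA (acc, String.ofList pre)).2]
      = acc ++ (((pre ++ ks.map pvChr).splitOn ';').map String.ofList) := by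
  induction ks generalizing acc pre with
  | nil =>
    have : pre.splitOn ';' = [pre] := by
      apply List.splitOnP_eq_single
      intro x hx
      simp only [beq_iff_eq]
      exact fun hxe => h (hxe ▸ hx)
    simp [this]
  | cons k ks ih =>
    by_cases hk : k = 59
    · subst hk
      have hstep : pvStepA (acc, String.ofList pre) 59 = (acc ++ [String.ofList pre], String.ofList []) := by
        simp [pvStepA]
      have hsplit : (pre ++ ';' :: ks.map pvChr).splitOn ';' = pre :: (ks.map pvChr).splitOn ';' := by
        apply List.splitOnP_first
        · intro x hx
          simp only [beq_iff_eq]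
          exact fun hxe => h (hxe ▸ hx)
        · simp
      simp only [List.foldl_cons, hstep, List.map_cons, pvChr_semi, hsplit]
      rw [ih (acc ++ [String.ofList pre]) [] (by simp)]
      simp
    · have hstep : pvStepA (acc, String.ofList pre) k = (acc, String.ofList (pre ++ [pvChr k])) := by
        simp only [pvStepA, if_pos hk]
        congr 1
        apply String.toList_injective
        simp [String.singleton]
      have hnot : ';' ∉ pre ++ [pvChr k] := by
        intro hm
        rcases List.mem_append.1 hm with hm | hm
        · exact h hm
        · exact pvChr_ne_semi hk ((List.mem_singleton.1 hm).symm)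
      simp only [List.foldl_cons, hstep, List.map_cons]
      rw [ih acc (pre ++ [pvChr k]) hnot]
      simp

-- ===== VERDICT (by name: the statement is the Claim_ definition above) =====
theorem get_commands_from_sequence_spec : Claim_equal_get_commands_from_sequence := by
  intro seq _ _
  unfold Spec_get_commands_from_sequence get_commands_from_sequence get_commands_from_sequence_alt
  have := foldA_split (PySem.List.slice seq none (some (-1))) [] [] (by simp)
  simp only [List.nil_append] at this
  simp [this]
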